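-- pv_equiv track=rewrite | github.com/fkguo/autoresearch-lab | skills/research-writer/scripts/bin/research_writer_learn_discussion_logic.py | _strip_latex_comments
-- ===== SOURCE A (Python) =====
-- def _strip_latex_comments(text: str) -> str:
--     """
--     Best-effort comment stripping: remove '%' comments unless escaped as '\\%'.
--     Not a full TeX parser (good enough for reading-pack generation).
--     """
--     out_lines: list[str] = []
--     for ln in text.splitlines():
--         cut = None
--         for i, ch in enumerate(ln):
--             if ch != "%":
--                 continue
--             # In TeX, '%' starts a comment unless escaped as '\%'.
--             # If there are N backslashes immediately preceding '%':
--             # - N odd  => '%' is escaped (literal percent)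
--             # - N even => '%' starts a comment (e.g. '\\%': linebreak then comment)
--             j = i - 1
--             n_bs = 0
--             while j >= 0 and ln[j] == "\\":
--                 n_bs += 1
--                 j -= 1
--             if n_bs % 2 == 0:
--                 cut = i
--                 break
--         out_lines.append(ln[:cut] if cut is not None else ln)
--     return "\n".join(out_lines) + ("\n" if text.endswith("\n") else "")
-- ===== SOURCE B (Python) =====
-- def _strip_latex_comments(text: str) -> str:
--     # Escape-pair consumption: a backslash swallows itself plus the next
--     # character; an unconsumed '%' ends the line's kept part.
--     def keep(s: str) -> str:
--         out = []
--         i = 0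
--         n = len(s)
--         while i < n:
--             c = s[i]
--             if c == "\\":
--                 out.append(s[i:i + 2])
--                 i += 2
--             elif c == "%":
--                 break
--             else:
--                 out.append(c)
--                 i += 1
--         return "".join(out)
--
--     return "\n".join(keep(ln) for ln in text.splitlines()) + (
--         "\n" if text.endswith("\n") else ""
--     )
-- ===== Notes on version B (the rewrite author's own statement) =====
-- stated objective: alternative
-- what changed: Replaced A's indexed scan for '%' with a backward recount of preceding backslashes at each candidate by escape-pair consumption: a single forward pass that swallows each backslash together with the following character and emits the kept prefix directly, with no cut index, no slicing and no backslash counter.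
import Mathlib
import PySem

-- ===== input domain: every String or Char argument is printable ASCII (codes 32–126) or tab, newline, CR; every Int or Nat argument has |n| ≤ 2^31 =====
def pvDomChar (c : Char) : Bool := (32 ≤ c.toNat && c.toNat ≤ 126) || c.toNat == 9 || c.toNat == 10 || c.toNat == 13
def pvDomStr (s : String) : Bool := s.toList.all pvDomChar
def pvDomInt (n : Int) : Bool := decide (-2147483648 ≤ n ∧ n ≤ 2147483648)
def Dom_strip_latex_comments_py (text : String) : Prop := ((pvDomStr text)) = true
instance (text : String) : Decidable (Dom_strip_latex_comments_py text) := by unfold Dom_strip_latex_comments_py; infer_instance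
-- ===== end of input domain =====

-- B replaces A's cut-index scan with backward backslash recount by a direct
-- escape-pair-consuming pass that emits the kept prefix (objective: alternative).


-- ===== PORT A =====
-- the inner `while j >= 0 and ln[j] == "\\"` backward count; `nBsA ln i` is the
-- count with j starting at i-1 (j encoded as the Nat i, so j = i - 1)
def nBsA (ln : List Char) : Nat → Nat
  | 0 => 0
  | j + 1 => if ln.getD j ' ' == '\\' then nBsA ln j + 1 else 0

-- the `for i, ch in enumerate(ln)` loop returning `cut`
def findCutA (ln : List Char) : List Char → Nat → Option Nat
  | [], _ => none
  | ch :: rest, i =>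
    if ch != '%' then findCutA ln rest (i + 1)
    else if nBsA ln i % 2 == 0 then some i
    else findCutA ln rest (i + 1)

def stripLineA (ln : String) : String :=
  match findCutA ln.toList ln.toList 0 with
  | some cut => String.ofList (ln.toList.take cut)   -- ln[:cut]
  | none => ln

def strip_latex_comments_py (text : String) : String :=
  PySem.Str.join "\n" ((PySem.Str.splitlines text).map stripLineA)
    ++ (if PySem.Str.endswith text "\n" then "\n" else "")

-- ===== PORT B =====
-- Source B's `while i < n` loop: a backslash swallows itself plus the next
-- character (`out.append(s[i:i+2]); i += 2`), an unconsumed '%' stops the loop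
def keepB : List Char → List Char
  | [] => []
  | c :: rest =>
    if c == '\\' then
      match rest with
      | [] => [c]                      -- s[i:i+2] is the lone final backslash
      | d :: rest' => c :: d :: keepB rest'
    else if c == '%' then []           -- break
    else c :: keepB rest

def stripLineB (ln : String) : String := String.ofList (keepB ln.toList)

def strip_latex_comments_py_alt (text : String) : String :=
  PySem.Str.join "\n" ((PySem.Str.splitlines text).map stripLineB)
    ++ (if PySem.Str.endswith text "\n" then "\n" else "")

-- ===== PRECONDITION & SPEC =====
def Spec_strip_latex_comments_py (text : String) (out : String) : Prop := out = strip_latex_comments_py_alt text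
instance (text : String) (out : String) : Decidable (Spec_strip_latex_comments_py text out) := by unfold Spec_strip_latex_comments_py; infer_instance

-- ===== CLAIM (what is proved, stated in full; the proofs are below) =====
def Claim_equal_strip_latex_comments_py : Prop := ∀ (text : String), Dom_strip_latex_comments_py text → Spec_strip_latex_comments_py text (strip_latex_comments_py text)

-- ===== LEMMAS AND PROOFS =====

theorem keepB_cons (c : Char) (rest : List Char) :
    keepB (c :: rest) = if c == '\\' then
        (match rest with | [] => [c] | d :: rest' => c :: d :: keepB rest')
      else if c == '%' then [] else c :: keepB rest := by
  rw [keepB.eq_def]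

theorem findCutA_ge (ln : List Char) :
    ∀ (suf : List Char) (i cut : Nat), findCutA ln suf i = some cut → i ≤ cut := by
  intro suf
  induction suf with
  | nil => intro i cut h; simp [findCutA] at h
  | cons ch rest ih =>
    intro i cut h
    rw [findCutA] at h
    split at h
    · exact Nat.le_of_succ_le (ih (i + 1) cut h)
    · split at h
      · cases h; exact Nat.le_refl _
      · exact Nat.le_of_succ_le (ih (i + 1) cut h)

-- core invariant: at a position i whose backward backslash count is even
-- (a "fresh" position; pair consumption always lands on such positions),
-- B's pair-consuming pass emits exactly the prefix of the suffix up to A's cut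
theorem keep_agree (ln : List Char) :
    ∀ (n : Nat) (suf : List Char) (i : Nat), suf.length = n → suf = ln.drop i →
      nBsA ln i % 2 = 0 →
      keepB suf = (match findCutA ln suf i with
        | some cut => suf.take (cut - i)
        | none => suf) := by
  intro n
  induction n using Nat.strong_induction_on with
  | _ n ih =>
    intro suf i hlen hdrop hpar
    match suf, hlen with
    | [], _ => simp [keepB, findCutA]
    | ch :: rest, hlen =>
      have hi : i < ln.length := by
        by_contra h
        rw [List.drop_eq_nil_of_le (by omega)] at hdrop
        simp at hdrop
      have hget : ln.getD i ' ' = ch := by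
        have h0 : (ln.drop i).head? = some ch := by rw [← hdrop]; rfl
        rw [List.head?_drop] at h0
        simp [List.getD_eq_getElem?_getD, h0]
      have hrest : rest = ln.drop (i + 1) := by
        have h := congrArg List.tail hdrop
        simpa [List.tail_drop] using h
      by_cases hbs : ch = '\\'
      · subst hbs
        have hn1 : nBsA ln (i + 1) = nBsA ln i + 1 := by
          simp only [nBsA]; rw [hget]; rfl
        match rest, hrest with
        | [], hrest =>
          have hdone : ln.drop (i + 1) = [] := hrest.symm
          simp [keepB, findCutA]
        | d :: rest', hrest =>
          have hgetd : ln.getD (i + 1) ' ' = d := by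
            have h0 : (ln.drop (i + 1)).head? = some d := by rw [← hrest]; rfl
            rw [List.head?_drop] at h0
            simp [List.getD_eq_getElem?_getD, h0]
          have hrest' : rest' = ln.drop (i + 2) := by
            have h := congrArg List.tail hrest
            simpa [List.tail_drop] using h
          have hpar2 : nBsA ln (i + 2) % 2 = 0 := by
            have : nBsA ln (i + 2) = if ln.getD (i + 1) ' ' == '\\' then nBsA ln (i + 1) + 1 else 0 := rfl
            rw [this]
            split
            · omega
            · rfl
          -- A skips position i (not '%') and position i+1 (either not '%', or
          -- '%' with odd count nBsA (i+1))
          have hskip : findCutA ln ('\\' :: d :: rest') i = findCutA ln rest' (i + 2) := by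
            rw [findCutA]
            simp only [show ('\\' != '%') = true from rfl, if_true]
            rw [findCutA]
            by_cases hd : d = '%'
            · subst hd
              have : (nBsA ln (i + 1) % 2 == 0) = false := by
                simp only [hn1, beq_eq_false_iff_ne]; omega
              simp [this]
            · have : (d != '%') = true := by simpa using hd
              simp [this]
          have hih := ih rest'.length (by simp at hlen ⊢; omega) rest' (i + 2) rfl hrest' hpar2
          rw [hskip]
          rw [keepB_cons]
          simp only [show ('\\' == '\\') = true from rfl, if_true]
          rw [hih]
          cases hfc : findCutA ln rest' (i + 2) with
          | none => rfl
          | some cut =>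
            have hge : i + 2 ≤ cut := findCutA_ge ln rest' (i + 2) cut hfc
            simp only []
            have h1 : cut - i = (cut - (i + 2)) + 2 := by omega
            rw [h1]
            rfl
      · by_cases hpc : ch = '%'
        · subst hpc
          rw [keepB_cons, findCutA]
          have hb : ('%' == '\\') = false := rfl
          have hp : ('%' != '%') = false := rfl
          have hpe : (nBsA ln i % 2 == 0) = true := by simpa using hpar
          simp [hb, hpe]
        · have hb : (ch == '\\') = false := by simpa using hbs
          have hp2 : (ch == '%') = false := by simpa using hpc
          have hp : (ch != '%') = true := by simpa using hpc
          have hpar1 : nBsA ln (i + 1) % 2 = 0 := by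
            have : nBsA ln (i + 1) = if ln.getD i ' ' == '\\' then nBsA ln i + 1 else 0 := rfl
            rw [this, hget, hb]
            rfl
          have hih := ih rest.length (by simp at hlen ⊢; omega) rest (i + 1) rfl hrest hpar1
          have hfca : findCutA ln (ch :: rest) i = findCutA ln rest (i + 1) := by
            rw [findCutA]; simp [hp]
          rw [hfca, keepB_cons]
          simp only [hb, hp2, Bool.false_eq_true, if_false]
          rw [hih]
          cases hfc : findCutA ln rest (i + 1) with
          | none => rfl
          | some cut =>
            have hge : i + 1 ≤ cut := findCutA_ge ln rest (i + 1) cut hfc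
            simp only []
            have h1 : cut - i = (cut - (i + 1)) + 1 := by omega
            rw [h1]
            rfl

theorem stripLine_agree (ln : String) : stripLineA ln = stripLineB ln := by
  unfold stripLineA stripLineB
  have h := keep_agree ln.toList ln.toList.length ln.toList 0 rfl rfl rfl
  rw [h]
  cases hfc : findCutA ln.toList ln.toList 0 with
  | none => simp
  | some cut => simp

-- ===== VERDICT (by name: the statement is the Claim_ definition above) =====
theorem strip_latex_comments_py_spec : Claim_equal_strip_latex_comments_py := by
  intro text _
  unfold Spec_strip_latex_comments_py strip_latex_comments_py strip_latex_comments_py_alt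
  rw [List.map_congr_left (fun ln _ => stripLine_agree ln)]
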